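-- pv_equiv track=rewrite | github.com/pypi-data/pypi-mirror-269 | packages/qat/qat-1.0.0-py3-none-any.whl/qat/gui/spy_window.py | sort_properties
-- ===== SOURCE A (Python) =====
-- def sort_properties(properties: list) -> list:
--     """
--     Sort given properties to move most important ones to the beginning of the list
--     """
--     properties = dict(properties)
--     properties = dict(sorted(properties.items()))
--     # Parent and children are in the tree
--     if 'children' in properties:
--         del properties['children']
--     if 'parent' in properties:
--         del properties['parent']
--     top_properties_names = ['objectName', 'type', 'id']
--     top_properties = {}
--     for top_prop in top_properties_names:
--         if top_prop in properties:
--             top_properties[top_prop] = properties[top_prop]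
--             del properties[top_prop]
--
--     return list(top_properties.items()) + list(properties.items())
-- ===== SOURCE B (Python) =====
-- def sort_properties(properties: list) -> list:
--     """
--     Sort given properties to move most important ones to the beginning of the list
--     """
--     d = dict(properties)
--     d.pop('children', None)
--     d.pop('parent', None)
--     top = ['objectName', 'type', 'id']
--     return sorted(d.items(),
--                   key=lambda kv: (top.index(kv[0]) if kv[0] in top else len(top), kv[0]))
-- ===== Notes on version B (the rewrite author's own statement) =====
-- stated objective: alternative
-- what changed: Replaces A's two-phase pipeline (sort items alphabetically, rebuild a dict, then peel the priority keys off into a second dict with a deletion loop) by two pops and one single keyed sort whose composite key (priority rank, key) yields the same order directly.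
import Mathlib
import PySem

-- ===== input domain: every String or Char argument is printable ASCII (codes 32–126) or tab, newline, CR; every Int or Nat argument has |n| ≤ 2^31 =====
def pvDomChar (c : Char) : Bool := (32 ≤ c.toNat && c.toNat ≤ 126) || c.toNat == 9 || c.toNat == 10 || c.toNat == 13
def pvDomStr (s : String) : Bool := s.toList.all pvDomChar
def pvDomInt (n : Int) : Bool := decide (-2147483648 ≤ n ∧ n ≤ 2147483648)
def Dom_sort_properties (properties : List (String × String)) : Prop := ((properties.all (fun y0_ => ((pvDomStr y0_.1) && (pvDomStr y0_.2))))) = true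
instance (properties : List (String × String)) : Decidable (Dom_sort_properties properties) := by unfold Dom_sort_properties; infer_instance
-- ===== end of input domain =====

-- B replaces A's two-phase pipeline (alphabetical sort, rebuild a dict, peel the priority keys
-- off into a second dict) with two erases and ONE keyed sort on the composite key
-- (priority rank, key): an alternative decomposition of the same task, not claimed faster.

-- ===== PORT A =====
-- transliteration of A: dict(properties); dict(sorted(items)); two guarded dels;
-- then the loop moving the three top keys into a second dict; concatenation of the items
def sort_properties (properties : List (String × String)) : List (String × String) :=
  let props0 := PySem.Dict.ofList properties
  let props1 := PySem.Dict.ofList (PySem.List.sorted2 props0.items (fun p => p.1) (fun p => p.2))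
  let props2 := if props1.contains "children" then props1.erase "children" else props1
  let props3 := if props2.contains "parent" then props2.erase "parent" else props2
  let st := (["objectName", "type", "id"] : List String).foldl
      (fun (st : PySem.Dict String String × PySem.Dict String String) top_prop =>
        if st.2.contains top_prop then
          (st.1.insert top_prop (st.2.getD top_prop ""), st.2.erase top_prop)
        else st)
      ((PySem.Dict.empty : PySem.Dict String String), props3)
  st.1.items ++ st.2.items

-- ===== PORT B =====
-- transliteration of B: dict(properties), two pops (= erases), one sort with key (rank, key)
def sort_properties_alt (properties : List (String × String)) : List (String × String) :=
  let d := ((PySem.Dict.ofList properties).erase "children").erase "parent"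
  let top : List String := ["objectName", "type", "id"]
  PySem.List.sorted2 d.items
    (fun kv => match PySem.List.index? top kv.1 with
      | some i => (i : Int)
      | none => (top.length : Int))
    (fun kv => kv.1) false


-- ===== PRECONDITION & SPEC =====
def Spec_sort_properties (properties : List (String × String)) (out : List (String × String)) : Prop := out = sort_properties_alt properties
instance (properties : List (String × String)) (out : List (String × String)) : Decidable (Spec_sort_properties properties out) := by unfold Spec_sort_properties; infer_instance

-- ===== CLAIM (what is proved, stated in full; the proofs are below) =====
def Claim_equal_sort_properties : Prop := ∀ (properties : List (String × String)), Dom_sort_properties properties → Spec_sort_properties properties (sort_properties properties)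

-- ===== LEMMAS AND PROOFS =====

lemma find?_filter_ne (l : List (String × String)) (k k' : String) (h : k' ≠ k) :
    (l.filter (fun p => !(p.1 == k))).find? (fun p => p.1 == k') = l.find? (fun p => p.1 == k') := by
  induction l with
  | nil => rfl
  | cons x xs ih =>
    by_cases hx : x.1 = k
    · simp [hx, ih, Ne.symm h]
    · by_cases hx' : x.1 = k'
      · simp [hx']; exact Or.inl h
      · simp [hx, hx', ih]

lemma get?_erase_of_ne (d : PySem.Dict String String) (k k' : String) (h : k' ≠ k) :
    (d.erase k).get? k' = d.get? k' := by
  simp [PySem.Dict.erase, PySem.Dict.get?, find?_filter_ne d.items k k' h]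

lemma ite_erase_items (d : PySem.Dict String String) (k : String) :
    (if d.contains k then d.erase k else d).items = d.items.filter (fun p => !(p.1 == k)) := by
  split
  · rfl
  · next h =>
    rw [eq_comm]
    apply List.filter_eq_self.mpr
    intro p hp
    have h' : (p.1 == k) = false := by
      cases hq : (p.1 == k) with
      | false => rfl
      | true => exact absurd (by rw [PySem.Dict.contains]; exact List.any_eq_true.mpr ⟨p, hp, hq⟩) h
    simp [h']

lemma ofList_items_of_nodup_keys (l : List (String × String)) (h : (l.map (·.1)).Nodup) :
    (PySem.Dict.ofList l).items = l := by
  have := PySem.Dict.items_foldl_insert_fresh (ν := String) l (fun p => p.1) (fun p => p.2)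
    PySem.Dict.empty (by intro a _; simp [PySem.Dict.contains_empty]) h
  simpa [PySem.Dict.ofList, PySem.Dict.update] using this

lemma nodup_keys_filter (l : List (String × String)) (q : String × String → Bool)
    (h : (l.map (·.1)).Nodup) : ((l.filter q).map (·.1)).Nodup :=
  h.sublist (List.Sublist.map _ (List.filter_sublist (p := q) (l := l)))

lemma loop_spec (names : List String) (top d : PySem.Dict String String)
    (hnd : (d.items.map (·.1)).Nodup) (hnames : names.Nodup)
    (hfresh : ∀ n ∈ names, top.contains n = false) :
    names.foldl
      (fun (st : PySem.Dict String String × PySem.Dict String String) top_prop =>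
        if st.2.contains top_prop then
          (st.1.insert top_prop (st.2.getD top_prop ""), st.2.erase top_prop)
        else st) (top, d) =
      (PySem.Dict.mk (top.items ++ names.filterMap (fun n => (d.get? n).map (fun v => (n, v)))),
       PySem.Dict.mk (d.items.filter (fun p => !names.contains p.1))) := by
  induction names generalizing top d with
  | nil => simp
  | cons n ns ih =>
    have hnmem : n ∉ ns := (List.nodup_cons.mp hnames).1
    by_cases hc : d.contains n = true
    · have hcs : (d.get? n).isSome := by rw [← PySem.Dict.contains_eq_isSome_get?]; exact hc
      obtain ⟨v, hv⟩ := Option.isSome_iff_exists.mp hcs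
      have hgetD : d.getD n "" = v := by simp [PySem.Dict.getD, hv]
      have htopi : (top.insert n v).items = top.items ++ [(n, v)] :=
        PySem.Dict.items_insert_of_not_contains top v (hfresh n (by simp))
      have hnd' : ((d.erase n).items.map (·.1)).Nodup := nodup_keys_filter _ _ hnd
      have hfresh' : ∀ m ∈ ns, (top.insert n v).contains m = false := by
        intro m hm
        rw [PySem.Dict.contains_insert]
        have hmn : m ≠ n := fun he => hnmem (he ▸ hm)
        simp [hmn, hfresh m (by simp [hm])]
      rw [List.foldl_cons]
      simp only [hc, if_true, hgetD]
      rw [ih (top.insert n v) (d.erase n) hnd' (List.nodup_cons.mp hnames).2 hfresh']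
      simp only [PySem.Dict.mk.injEq, Prod.mk.injEq]
      constructor
      · rw [htopi, List.filterMap_cons, hv, List.append_assoc]
        congr 1
        rw [List.filterMap_congr (g := fun m => (d.get? m).map (fun v => (m, v)))
          (fun m hm => by rw [get?_erase_of_ne d n m (fun he => hnmem (he ▸ hm))])]
        rfl
      · show ((d.erase n).items.filter _) = _
        rw [show (d.erase n).items = d.items.filter (fun p => !(p.1 == n)) from rfl,
          List.filter_filter]
        apply List.filter_congr
        intro p _
        by_cases hpn : p.1 = n <;> simp [hpn, Bool.and_comm]
    · rw [Bool.not_eq_true] at hc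
      have hcs : d.get? n = none := by
        have h2 := PySem.Dict.contains_eq_isSome_get? d n
        rw [hc] at h2
        exact Option.not_isSome_iff_eq_none.mp (by simp [← h2])
      rw [List.foldl_cons]
      simp only [hc, Bool.false_eq_true, if_false]
      rw [ih top d hnd (List.nodup_cons.mp hnames).2 (fun m hm => hfresh m (by simp [hm]))]
      simp only [PySem.Dict.mk.injEq, Prod.mk.injEq]
      constructor
      · rw [List.filterMap_cons, hcs]; rfl
      · apply List.filter_congr
        intro p hp
        have h' : (p.1 == n) = false := by
          cases hq : (p.1 == n) with
          | false => rfl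
          | true =>
            have : d.contains n = true := by rw [PySem.Dict.contains]; exact List.any_eq_true.mpr ⟨p, hp, hq⟩
            rw [hc] at this; exact absurd this (by simp)
        simp
        exact fun _ => by simpa using h'

lemma sorted2_eq_sorted_lex {α κ₁ κ₂ : Type} [LinearOrder κ₁] [LinearOrder κ₂]
    (xs : List α) (k1 : α → κ₁) (k2 : α → κ₂) :
    PySem.List.sorted2 xs k1 k2 false = PySem.List.sorted xs (fun x => toLex (k1 x, k2 x)) false := by
  have h : (fun a b => decide (k1 a < k1 b) || (!decide (k1 b < k1 a) && decide (k2 a < k2 b)))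
      = (fun a b => decide ((toLex (k1 a, k2 a) : κ₁ ×ₗ κ₂) < toLex (k1 b, k2 b))) := by
    funext a b
    rcases lt_trichotomy (k1 a) (k1 b) with hlt | heq | hgt
    · simp [Prod.Lex.toLex_lt_toLex, hlt]
    · simp [Prod.Lex.toLex_lt_toLex, heq]
    · simp [Prod.Lex.toLex_lt_toLex, hgt, not_lt_of_gt hgt, ne_of_gt hgt]
  simp only [PySem.List.sorted2, PySem.List.sorted, if_neg (by simp : ¬(false = true))]
  rw [h]

lemma map_fst_filterMap_get (names : List String) (h : String → Option String) :
    ((names.filterMap (fun n => (h n).map (fun v => (n, v)))).map (·.1))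
      = names.filter (fun n => (h n).isSome) := by
  induction names with
  | nil => rfl
  | cons n ns ih =>
    cases hn : h n <;> simp [hn, ih]

theorem main_eq (properties : List (String × String)) :
    sort_properties properties = sort_properties_alt properties := by
  set d0 := PySem.Dict.ofList properties with hd0def
  set s := PySem.List.sorted2 d0.items (fun p => p.1) (fun p => p.2) false with hsdef
  -- basic facts about s
  have hsp : s.Perm d0.items := PySem.List.sorted2_perm _ _ _ _
  have hnd0 : (d0.items.map (·.1)).Nodup := PySem.Dict.nodup_keys_ofList properties
  have hndS : (s.map (·.1)).Nodup := ((hsp.map (·.1)).nodup_iff).mpr hnd0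
  have hsfst : s.Pairwise (fun a b => a.1 < b.1) := by
    have hle : s.Pairwise (fun a b => (toLex (a.1, a.2) : String ×ₗ String) ≤ toLex (b.1, b.2)) := by
      rw [hsdef, sorted2_eq_sorted_lex]
      exact PySem.List.sorted_pairwise d0.items _
    have hne : s.Pairwise (fun a b => a.1 ≠ b.1) := List.pairwise_map.mp hndS
    exact (hle.and hne).imp (fun {a b} ⟨h1, h2⟩ => by
      rcases Prod.Lex.toLex_le_toLex.mp h1 with h | ⟨h, _⟩
      · exact h
      · exact absurd h h2)
  -- the filtered list after the two deletions
  set s1 := s.filter (fun p => !(p.1 == "children")) with hs1def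
  set s2 := s1.filter (fun p => !(p.1 == "parent")) with hs2def
  have hndS2 : (s2.map (·.1)).Nodup := nodup_keys_filter _ _ (nodup_keys_filter _ _ hndS)
  have hS2nodup : s2.Nodup := List.Nodup.of_map _ hndS2
  have hs2fst : s2.Pairwise (fun a b => a.1 < b.1) := (hsfst.filter _).filter _
  -- A's dict pipeline in terms of item lists
  have hd1 : (PySem.Dict.ofList s).items = s := ofList_items_of_nodup_keys s hndS
  have hp2eq : (if (PySem.Dict.ofList s).contains "children" then (PySem.Dict.ofList s).erase "children" else (PySem.Dict.ofList s)) = PySem.Dict.mk s1 := by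
    apply PySem.Dict.ext
    rw [ite_erase_items, hd1]
  have hp3eq : (if (PySem.Dict.mk s1).contains "parent" then (PySem.Dict.mk s1).erase "parent" else (PySem.Dict.mk s1)) = PySem.Dict.mk s2 := by
    apply PySem.Dict.ext
    rw [ite_erase_items]
  -- unfold both ports
  rw [sort_properties, sort_properties_alt]
  rw [← hd0def, ← hsdef, hp2eq, hp3eq]
  rw [loop_spec ["objectName", "type", "id"] PySem.Dict.empty (PySem.Dict.mk s2) hndS2
    (by decide) (fun n _ => PySem.Dict.contains_empty n)]
  simp only [PySem.Dict.empty, List.nil_append]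
  rw [sorted2_eq_sorted_lex]
  refine (PySem.List.sorted_eq_of_perm_of_pairwise_lt _ _ _ ?hperm ?hpair).symm
  case hperm =>
    have hkeysmk : (PySem.Dict.mk s2).keys.Nodup := hndS2
    have hLperm : s2.Perm ((d0.items.filter (fun p => !(p.1 == "children"))).filter (fun p => !(p.1 == "parent"))) := by
      rw [hs2def, hs1def]
      exact (hsp.filter _).filter _
    have hTperm : (List.filterMap (fun n => Option.map (fun v => (n, v)) ((PySem.Dict.mk s2).get? n)) ["objectName","type","id"]).Perm
        (s2.filter (fun p => (["objectName","type","id"] : List String).contains p.1)) := by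
      have hTnodup : (List.filterMap (fun n => Option.map (fun v => (n, v)) ((PySem.Dict.mk s2).get? n)) ["objectName","type","id"]).Nodup := by
        apply List.Nodup.of_map (fun p : String × String => p.1)
        rw [map_fst_filterMap_get]
        exact List.Nodup.filter _ (by decide)
      apply (List.perm_ext_iff_of_nodup hTnodup (hS2nodup.filter _)).mpr
      intro p
      simp only [List.mem_filterMap, List.mem_filter]
      constructor
      · rintro ⟨n, hn, hsome⟩
        rcases Option.map_eq_some_iff.mp hsome with ⟨v, hget, hpv⟩
        have hmem : (n, v) ∈ s2 := (PySem.Dict.get?_eq_some_iff_mem_items _ n v hkeysmk).mp hget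
        subst hpv
        exact ⟨hmem, by simpa using hn⟩
      · rintro ⟨hps2, hcont⟩
        refine ⟨p.1, by simpa using hcont, ?_⟩
        have hget : (PySem.Dict.mk s2).get? p.1 = some p.2 :=
          (PySem.Dict.get?_eq_some_iff_mem_items _ p.1 p.2 hkeysmk).mpr (by simpa using hps2)
        simp [hget]
    exact ((hTperm.append (List.Perm.refl _)).trans (List.filter_append_perm _ s2)).trans hLperm
  case hpair =>
    have hidx_obj : List.idxOf? "objectName" (["objectName","type","id"] : List String) = some 0 := by decide
    have hidx_type : List.idxOf? "type" (["objectName","type","id"] : List String) = some 1 := by decide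
    have hidx_id : List.idxOf? "id" (["objectName","type","id"] : List String) = some 2 := by decide
    have hrank_none : ∀ (x : String × String), x.1 ∉ (["objectName","type","id"] : List String) →
        PySem.List.index? (["objectName","type","id"] : List String) x.1 = none :=
      fun x hx => (PySem.List.index?_eq_none_iff _ _).mpr hx
    rw [List.pairwise_append]
    refine ⟨?_, ?_, ?_⟩
    · -- the selected top properties, in priority order
      rcases ho : (PySem.Dict.mk s2).get? "objectName" with _ | vo <;>
        rcases ht : (PySem.Dict.mk s2).get? "type" with _ | vt <;>
          rcases hi : (PySem.Dict.mk s2).get? "id" with _ | vi <;>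
            simp [ho, ht, hi, List.pairwise_cons, Prod.Lex.toLex_lt_toLex,
              hidx_obj, hidx_type, hidx_id]
    · -- the alphabetical remainder: equal rank 3, strictly increasing keys
      refine List.Pairwise.imp_of_mem ?_ (hs2fst.filter (fun p => !(["objectName","type","id"] : List String).contains p.1))
      intro a b ha hb hab
      have hna : a.1 ∉ (["objectName","type","id"] : List String) := by
        have := (List.mem_filter.mp ha).2; simpa using this
      have hnb : b.1 ∉ (["objectName","type","id"] : List String) := by
        have := (List.mem_filter.mp hb).2; simpa using this
      refine Prod.Lex.toLex_lt_toLex.mpr (Or.inr ⟨?_, hab⟩)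
      rw [hrank_none a hna, hrank_none b hnb]
    · -- every selected top property precedes every remaining one (rank < 3)
      intro a ha b hb
      have hnb : b.1 ∉ (["objectName","type","id"] : List String) := by
        have := (List.mem_filter.mp hb).2; simpa using this
      rcases List.mem_filterMap.mp ha with ⟨n, hn, hsome⟩
      rcases Option.map_eq_some_iff.mp hsome with ⟨v, hget, hpv⟩
      subst hpv
      refine Prod.Lex.toLex_lt_toLex.mpr (Or.inl ?_)
      rw [hrank_none b hnb]
      fin_cases hn <;> simp [hidx_obj, hidx_type, hidx_id]

-- ===== VERDICT (by name: the statement is the Claim_ definition above) =====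
theorem sort_properties_spec : Claim_equal_sort_properties := by
  intro properties _
  exact main_eq properties
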